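-- pv_equiv track=rewrite | github.com/Rajat9632/FitYou---Fit_Ai | app.py | detect_health_conditions
-- ===== SOURCE A (Python) =====
-- def detect_health_conditions(text):
--     """Detect health conditions from extracted text."""
--     if not text:
--         return []
--
--     text_lower = text.lower()
--     detected_conditions = []
--
--     # Medical condition keywords mapping
--     conditions = {
--         "diabetes": "Diabetes",
--         "diabetic": "Diabetes",
--         "blood sugar": "Diabetes",
--         "glucose": "Diabetes",
--         "high blood pressure": "High Blood Pressure",
--         "hypertension": "High Blood Pressure",
--         "bp": "High Blood Pressure",
--         "heart disease": "Heart Disease",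
--         "cardiac": "Heart Disease",
--         "coronary": "Heart Disease",
--         "asthma": "Asthma",
--         "respiratory": "Respiratory Issues",
--         "cancer": "Cancer",
--         "tumor": "Cancer",
--         "malignant": "Cancer",
--         "kidney disease": "Kidney Disease",
--         "renal": "Kidney Disease",
--         "lung disease": "Lung Disease",
--         "pulmonary": "Lung Disease",
--         "arthritis": "Arthritis",
--         "thyroid": "Thyroid Disorder",
--         "cholesterol": "High Cholesterol",
--         "migraine": "Migraine",
--         "depression": "Depression",
--         "anxiety": "Anxiety"
--     }
--
--     # Check for each condition
--     for keyword, condition in conditions.items():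
--         if keyword in text_lower and condition not in detected_conditions:
--             detected_conditions.append(condition)
--
--     return detected_conditions
-- ===== SOURCE B (Python) =====
-- # Ordered condition -> keywords table; one pass over conditions with any(), no dedup check needed.
-- CONDITION_KEYWORDS = {
--     "Diabetes": ["diabetes", "diabetic", "blood sugar", "glucose"],
--     "High Blood Pressure": ["high blood pressure", "hypertension", "bp"],
--     "Heart Disease": ["heart disease", "cardiac", "coronary"],
--     "Asthma": ["asthma"],
--     "Respiratory Issues": ["respiratory"],
--     "Cancer": ["cancer", "tumor", "malignant"],
--     "Kidney Disease": ["kidney disease", "renal"],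
--     "Lung Disease": ["lung disease", "pulmonary"],
--     "Arthritis": ["arthritis"],
--     "Thyroid Disorder": ["thyroid"],
--     "High Cholesterol": ["cholesterol"],
--     "Migraine": ["migraine"],
--     "Depression": ["depression"],
--     "Anxiety": ["anxiety"],
-- }
--
--
-- def detect_health_conditions(text):
--     """Detect health conditions from extracted text."""
--     if not text:
--         return []
--     text_lower = text.lower()
--     return [cond for cond, kws in CONDITION_KEYWORDS.items()
--             if any(kw in text_lower for kw in kws)]
-- ===== Notes on version B (the rewrite author's own statement) =====
-- stated objective: simpler
-- what changed: Replaces the flat keyword-to-condition pass with its membership dedup check by an ordered condition-to-keyword-list table traversed once per condition with any(), so the dedup check disappears.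
import Mathlib
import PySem

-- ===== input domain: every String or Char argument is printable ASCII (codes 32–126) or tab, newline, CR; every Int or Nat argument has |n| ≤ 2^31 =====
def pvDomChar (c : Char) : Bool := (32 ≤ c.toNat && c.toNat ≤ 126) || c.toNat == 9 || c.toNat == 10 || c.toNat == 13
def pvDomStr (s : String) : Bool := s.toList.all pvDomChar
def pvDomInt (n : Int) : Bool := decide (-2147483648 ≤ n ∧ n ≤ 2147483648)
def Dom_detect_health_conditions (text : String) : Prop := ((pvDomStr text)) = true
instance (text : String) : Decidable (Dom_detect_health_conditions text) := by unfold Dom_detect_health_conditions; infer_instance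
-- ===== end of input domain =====

-- B changes the data structure: an ordered condition -> keywords table traversed once per
-- condition (any() over its keywords), instead of A's flat keyword -> condition pass with a
-- 'condition not in detected' dedup check; objective: simpler.

-- ===== PORT A =====
-- A's dict of keyword -> condition, in insertion order
def pvPairsA : List (String × String) :=
  [("diabetes", "Diabetes"), ("diabetic", "Diabetes"), ("blood sugar", "Diabetes"),
   ("glucose", "Diabetes"), ("high blood pressure", "High Blood Pressure"),
   ("hypertension", "High Blood Pressure"), ("bp", "High Blood Pressure"),
   ("heart disease", "Heart Disease"), ("cardiac", "Heart Disease"),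
   ("coronary", "Heart Disease"), ("asthma", "Asthma"), ("respiratory", "Respiratory Issues"),
   ("cancer", "Cancer"), ("tumor", "Cancer"), ("malignant", "Cancer"),
   ("kidney disease", "Kidney Disease"), ("renal", "Kidney Disease"),
   ("lung disease", "Lung Disease"), ("pulmonary", "Lung Disease"),
   ("arthritis", "Arthritis"), ("thyroid", "Thyroid Disorder"),
   ("cholesterol", "High Cholesterol"), ("migraine", "Migraine"),
   ("depression", "Depression"), ("anxiety", "Anxiety")]

def detect_health_conditions (text : String) : List String :=
  if text.toList = [] then []
  else
    let text_lower := (PySem.Str.lower text).toList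
    pvPairsA.foldl
      (fun detected kv =>
        if PySem.Chars.isIn kv.1.toList text_lower = true ∧ kv.2 ∉ detected
        then detected ++ [kv.2] else detected) []

-- ===== PORT B =====
-- B's ordered dict of condition -> keyword list
def pvGroupsB : List (String × List String) :=
  [("Diabetes", ["diabetes", "diabetic", "blood sugar", "glucose"]),
   ("High Blood Pressure", ["high blood pressure", "hypertension", "bp"]),
   ("Heart Disease", ["heart disease", "cardiac", "coronary"]),
   ("Asthma", ["asthma"]),
   ("Respiratory Issues", ["respiratory"]),
   ("Cancer", ["cancer", "tumor", "malignant"]),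
   ("Kidney Disease", ["kidney disease", "renal"]),
   ("Lung Disease", ["lung disease", "pulmonary"]),
   ("Arthritis", ["arthritis"]),
   ("Thyroid Disorder", ["thyroid"]),
   ("High Cholesterol", ["cholesterol"]),
   ("Migraine", ["migraine"]),
   ("Depression", ["depression"]),
   ("Anxiety", ["anxiety"])]

def detect_health_conditions_alt (text : String) : List String :=
  if text.toList = [] then []
  else
    let text_lower := (PySem.Str.lower text).toList
    (pvGroupsB.filter
      (fun g => g.2.any (fun kw => PySem.Chars.isIn kw.toList text_lower))).map Prod.fst

-- ===== PRECONDITION & SPEC =====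
def Spec_detect_health_conditions (text : String) (out : List String) : Prop := out = detect_health_conditions_alt text
instance (text : String) (out : List String) : Decidable (Spec_detect_health_conditions text out) := by unfold Spec_detect_health_conditions; infer_instance

-- ===== CLAIM (what is proved, stated in full; the proofs are below) =====
def Claim_equal_detect_health_conditions : Prop := ∀ (text : String), Dom_detect_health_conditions text → Spec_detect_health_conditions text (detect_health_conditions text)

-- ===== LEMMAS AND PROOFS =====

-- A's loop step, for a fixed lowered text t
def pvStepA (t : List Char) (detected : List String) (kv : String × String) : List String :=
  if PySem.Chars.isIn kv.1.toList t = true ∧ kv.2 ∉ detected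
  then detected ++ [kv.2] else detected

-- once a condition is already in the accumulator, its keyword pairs change nothing
lemma pvFold_mem (t : List Char) (c : String) (ks : List String) (acc : List String)
    (hc : c ∈ acc) :
    (ks.map (fun k => (k, c))).foldl (pvStepA t) acc = acc := by
  induction ks with
  | nil => rfl
  | cons k ks ih =>
    simp only [List.map_cons, List.foldl_cons, pvStepA]
    rw [if_neg (by simp [hc])]
    exact ih

-- one condition group: the fold appends c iff some keyword of the group occurs in t
lemma pvFold_group (t : List Char) (c : String) (ks : List String) (acc : List String)
    (hc : c ∉ acc) :
    (ks.map (fun k => (k, c))).foldl (pvStepA t) acc =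
      if ks.any (fun k => PySem.Chars.isIn k.toList t) then acc ++ [c] else acc := by
  induction ks generalizing acc with
  | nil => simp
  | cons k ks ih =>
    simp only [List.map_cons, List.foldl_cons, List.any_cons, pvStepA]
    by_cases h : PySem.Chars.isIn k.toList t = true
    · rw [if_pos ⟨h, hc⟩, pvFold_mem t c ks (acc ++ [c]) (by simp)]
      simp [h]
    · rw [if_neg (by simp [h])]
      rw [ih acc hc]
      simp [h]

-- the whole flattened fold equals B's filter-and-project, given fresh, distinct condition names
lemma pvFold_groups (t : List Char) (groups : List (String × List String)) (acc : List String)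
    (hfresh : ∀ g ∈ groups, g.1 ∉ acc) (hnodup : (groups.map Prod.fst).Nodup) :
    (groups.flatMap (fun g => g.2.map (fun k => (k, g.1)))).foldl (pvStepA t) acc =
      acc ++ (groups.filter
        (fun g => g.2.any (fun kw => PySem.Chars.isIn kw.toList t))).map Prod.fst := by
  induction groups generalizing acc with
  | nil => simp
  | cons g gs ih =>
    simp only [List.flatMap_cons, List.foldl_append]
    rw [pvFold_group t g.1 g.2 acc (hfresh g (by simp))]
    simp only [List.map_cons, List.nodup_cons] at hnodup
    by_cases h : g.2.any (fun kw => PySem.Chars.isIn kw.toList t) = true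
    · rw [if_pos h]
      rw [ih (acc ++ [g.1]) ?_ hnodup.2]
      · simp [h]
      · intro g' hg'
        simp only [List.mem_append, List.mem_singleton]
        rintro (h1 | h1)
        · exact hfresh g' (by simp [hg']) h1
        · exact hnodup.1 (h1 ▸ List.mem_map_of_mem hg')
    · rw [if_neg h]
      rw [ih acc (fun g' hg' => hfresh g' (by simp [hg'])) hnodup.2]
      simp [h]

-- A's flat pair list is exactly B's table flattened
lemma pvPairsA_eq : pvPairsA = pvGroupsB.flatMap (fun g => g.2.map (fun k => (k, g.1))) := by
  decide

-- ===== VERDICT (by name: the statement is the Claim_ definition above) =====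
theorem detect_health_conditions_spec : Claim_equal_detect_health_conditions := by
  intro text _
  unfold Spec_detect_health_conditions detect_health_conditions detect_health_conditions_alt
  by_cases h : text.toList = []
  · simp [h]
  · rw [if_neg h, if_neg h]
    show pvPairsA.foldl (pvStepA ((PySem.Str.lower text).toList)) [] = _
    rw [pvPairsA_eq,
      pvFold_groups ((PySem.Str.lower text).toList) pvGroupsB [] (by simp) (by decide)]
    simp
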